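-- pv_equiv track=rewrite | github.com/scottjoyner/generated_text | hf/merge_metadata.py | extract_repo_id_from_url
-- ===== SOURCE A (Python) =====
-- from typing import Optional
--
-- def extract_repo_id_from_url(url: str) -> Optional[str]:
--     if not isinstance(url, str) or "huggingface.co/" not in url:
--         return None
--     tail = url.split("huggingface.co/")[-1].split("?")[0].split("#")[0].strip("/")
--     if not tail:
--         return None
--     parts = [p for p in tail.split("/") if p]
--     if len(parts) >= 2:
--         return f"{parts[0]}/{parts[1]}"
--     if len(parts) == 1:
--         return parts[0]
--     return None
-- ===== SOURCE B (Python) =====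
-- from typing import Optional
--
-- def extract_repo_id_from_url(url: str) -> Optional[str]:
--     if not isinstance(url, str):
--         return None
--     i = url.rfind("huggingface.co/")
--     if i < 0:
--         return None
--     segs = []
--     cur = []
--     for ch in url[i + len("huggingface.co/"):]:
--         if ch == "?" or ch == "#" or len(segs) == 2:
--             break
--         if ch == "/":
--             if cur:
--                 segs.append("".join(cur))
--                 cur = []
--         else:
--             cur.append(ch)
--     if cur and len(segs) < 2:
--         segs.append("".join(cur))
--     return "/".join(segs) if segs else None
-- ===== Notes on version B (the rewrite author's own statement) =====
-- stated objective: alternative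
-- what changed: Replaces the chain of split/split/split/strip/filter passes over the tail with a single rfind locating the last occurrence of the host prefix plus one left-to-right character scan that collects at most two non-empty path segments and stops at the query/fragment delimiters or after the second segment.
import Mathlib
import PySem

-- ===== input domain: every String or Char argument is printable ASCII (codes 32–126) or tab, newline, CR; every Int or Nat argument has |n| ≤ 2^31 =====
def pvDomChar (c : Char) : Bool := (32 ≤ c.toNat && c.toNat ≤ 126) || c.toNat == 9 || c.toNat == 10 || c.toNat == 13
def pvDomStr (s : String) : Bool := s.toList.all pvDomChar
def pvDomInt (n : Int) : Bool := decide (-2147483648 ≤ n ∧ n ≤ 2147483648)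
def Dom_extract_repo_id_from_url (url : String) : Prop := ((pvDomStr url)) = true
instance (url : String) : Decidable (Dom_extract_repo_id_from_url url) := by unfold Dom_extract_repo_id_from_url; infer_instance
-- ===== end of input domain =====

-- B replaces A's split/split/split/strip/filter chain by one rfind plus a single
-- left-to-right scan collecting at most two non-empty segments (objective: alternative).

-- ===== PORT A =====
-- Port of A at the char-list level: str.split -> PySem.Chars.splitOn, [-1]/[0] ->
-- PySem.List.pyGetD, strip("/") -> PySem.Chars.stripChars, "in" -> PySem.Chars.isIn.

def extract_repo_id_from_url (url : String) : Option String :=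
  if PySem.Chars.isIn "huggingface.co/".toList url.toList = false then none
  else
    let tail1 := PySem.List.pyGetD (PySem.Chars.splitOn url.toList "huggingface.co/".toList) (-1) []
    let tail2 := PySem.List.pyGetD (PySem.Chars.splitOn tail1 ['?']) 0 []
    let tail3 := PySem.List.pyGetD (PySem.Chars.splitOn tail2 ['#']) 0 []
    let tail := PySem.Chars.stripChars tail3 ['/']
    if tail = [] then none
    else
      let parts := (PySem.Chars.splitOn tail ['/']).filter (fun p => p ≠ [])
      if 2 ≤ parts.length then
        some (String.mk (PySem.List.pyGetD parts 0 [] ++ '/' :: PySem.List.pyGetD parts 1 []))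
      else if parts.length = 1 then some (String.mk (PySem.List.pyGetD parts 0 []))
      else none

-- ===== PORT B =====
-- Port of Source B: rfind, slice from i+15, then the explicit for-loop over the tail
-- (scanB carries the Python loop state: segs and cur; strings kept as char lists,
-- "".join(cur) is the identity there and "/".join is PySem.Chars.join).

def scanB : List Char → List (List Char) → List Char → List (List Char) × List Char
  | [], segs, cur => (segs, cur)
  | c :: rest, segs, cur =>
    if c = '?' ∨ c = '#' ∨ segs.length = 2 then (segs, cur)
    else if c = '/' then
      (if cur ≠ [] then scanB rest (segs ++ [cur]) [] else scanB rest segs cur)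
    else scanB rest segs (cur ++ [c])

def extract_repo_id_from_url_alt (url : String) : Option String :=
  let i := PySem.Chars.rfind url.toList "huggingface.co/".toList
  if i < 0 then none
  else
    let t := PySem.Chars.slice url.toList (some (i + 15)) none
    let p := scanB t [] []
    let segs := if p.2 ≠ [] ∧ p.1.length < 2 then p.1 ++ [p.2] else p.1
    if segs = [] then none
    else some (String.mk (PySem.Chars.join ['/'] segs))

-- ===== PRECONDITION & SPEC =====
-- A is total on str inputs: no Pre_.
def Spec_extract_repo_id_from_url (url : String) (out : Option String) : Prop := out = extract_repo_id_from_url_alt url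
instance (url : String) (out : Option String) : Decidable (Spec_extract_repo_id_from_url url out) := by unfold Spec_extract_repo_id_from_url; infer_instance

-- ===== CLAIM (what is proved, stated in full; the proofs are below) =====
def Claim_equal_extract_repo_id_from_url : Prop := ∀ (url : String), Dom_extract_repo_id_from_url url → Spec_extract_repo_id_from_url url (extract_repo_id_from_url url)

-- ===== LEMMAS AND PROOFS =====

def mapHead (f : List Char → List Char) : List (List Char) → List (List Char)
  | [] => []
  | h :: t => f h :: t

theorem go_master (sep : List Char) (hsep : sep ≠ []) :
    ∀ fuel l cur acc, l.length < fuel →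
      PySem.Chars.splitOn.go sep fuel l cur acc
        = acc.reverse ++ mapHead (cur.reverse ++ ·) (PySem.Chars.splitOn.go sep (l.length + 1) l [] []) := by
  intro fuel
  induction fuel using Nat.strong_induction_on with
  | _ fuel IH =>
    intro l cur acc hlt
    match fuel, l with
    | f+1, [] =>
      simp [PySem.Chars.splitOn.go, mapHead]
    | f+1, c :: rest =>
      rw [PySem.Chars.splitOn.go]
      rw [show ((c :: rest).length + 1) = (rest.length + 1) + 1 from by simp]
      rw [PySem.Chars.splitOn.go]
      by_cases hp : sep.isPrefixOf (c :: rest) = true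
      · simp only [hp, if_true]
        have hd : (List.drop sep.length (c :: rest)).length < f := by
          have h1 : 1 ≤ sep.length := by
            cases sep with | nil => exact absurd rfl hsep | cons a b => simp
          have := List.length_drop (l := c :: rest) (i := sep.length)
          simp at hlt ⊢
          omega
        have hd2 : (List.drop sep.length (c :: rest)).length < rest.length + 1 := by
          have h1 : 1 ≤ sep.length := by
            cases sep with | nil => exact absurd rfl hsep | cons a b => simp
          simp; omega
        rw [IH f (by omega) _ _ _ hd, IH (rest.length + 1) (by simp at hlt; omega) _ _ _ hd2]
        simp [mapHead]
      · simp only [hp, if_false]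
        have hr : rest.length < f := by simp at hlt; omega
        rw [IH f (by omega) rest (c :: cur) acc hr,
            IH (rest.length + 1) (by omega) rest [c] [] (by omega)]
        cases hgo : PySem.Chars.splitOn.go sep (rest.length + 1) rest [] [] with
        | nil => simp [mapHead]
        | cons h t => simp [mapHead]

theorem mapHead_ident (l : List (List Char)) : mapHead (fun x => x) l = l := by
  cases l <;> simp [mapHead]

theorem splitOn_nil (sep : List Char) : PySem.Chars.splitOn [] sep = [[]] := by
  simp [PySem.Chars.splitOn, PySem.Chars.splitOn.go]

theorem splitOn_prefix (sep l : List Char) (hsep : sep ≠ []) (hp : sep.isPrefixOf l = true) :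
    PySem.Chars.splitOn l sep = [] :: PySem.Chars.splitOn (l.drop sep.length) sep := by
  have hl : l ≠ [] := by
    cases l with
    | nil => cases sep with | nil => exact absurd rfl hsep | cons a b => simp [List.isPrefixOf] at hp
    | cons c r => simp
  obtain ⟨c, r, rfl⟩ := List.exists_cons_of_ne_nil hl
  have hs1 : 1 ≤ sep.length := by cases sep with | nil => exact absurd rfl hsep | cons a b => simp
  unfold PySem.Chars.splitOn
  rw [PySem.Chars.splitOn.go]
  simp only [hp, if_true]
  rw [go_master sep hsep _ _ _ _ (by simp; omega)]
  simp [mapHead_ident]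

theorem splitOn_cons_not_prefix (sep : List Char) (c : Char) (rest : List Char) (hsep : sep ≠ [])
    (hp : ¬ sep.isPrefixOf (c :: rest) = true) :
    PySem.Chars.splitOn (c :: rest) sep = mapHead (c :: ·) (PySem.Chars.splitOn rest sep) := by
  unfold PySem.Chars.splitOn
  rw [PySem.Chars.splitOn.go]
  simp only [hp, Bool.false_eq_true, if_false, List.length_cons]
  rw [go_master sep hsep (rest.length + 1) rest [c] [] (by omega)]
  cases hgo : PySem.Chars.splitOn.go sep (rest.length + 1) rest [] [] with
  | nil => simp [mapHead, hgo]
  | cons h t => simp [mapHead, hgo]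

theorem splitOn_ne_nil (sep : List Char) (hsep : sep ≠ []) : ∀ l, PySem.Chars.splitOn l sep ≠ [] := by
  intro l
  induction hn : l.length using Nat.strong_induction_on generalizing l with
  | _ n IH =>
    subst hn
    by_cases hp : sep.isPrefixOf l = true
    · rw [splitOn_prefix sep l hsep hp]; simp
    · cases l with
      | nil => rw [splitOn_nil]; simp
      | cons c rest =>
        rw [splitOn_cons_not_prefix sep c rest hsep hp]
        cases hgo : PySem.Chars.splitOn rest sep with
        | nil => exact absurd hgo (IH rest.length (by simp) rest rfl)
        | cons h t => simp [mapHead]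

def hfSep : List Char := "huggingface.co/".toList

theorem hfSep_ne_nil : hfSep ≠ [] := by decide
theorem hfSep_len : hfSep.length = 15 := by decide

theorem noOverlap (m : List Char) (i : Nat) (h : hfSep <+: m) (h0 : 0 < i) (h15 : i < 15) :
    ¬ hfSep <+: m.drop i := by
  obtain ⟨r, rfl⟩ := h
  intro h2
  rw [List.drop_append_of_le_length (by rw [hfSep_len]; omega)] at h2
  have hlen : (List.drop i hfSep).length = 15 - i := by rw [List.length_drop, hfSep_len]
  have hg := List.IsPrefix.getElem h2 (i := 0) (by rw [hfSep_len]; omega)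
  rw [List.getElem_append_left (by omega)] at hg
  rw [List.getElem_drop] at hg
  simp only [Nat.add_zero] at hg
  have key : ∀ i, i < 15 → 0 < i → hfSep[0]! ≠ hfSep[i]! := by decide
  have key2 := key i h15 h0
  rw [getElem!_pos hfSep 0 (by rw [hfSep_len]; omega), getElem!_pos hfSep i (by rw [hfSep_len]; omega)] at key2
  exact key2 hg

def tailOf (l : List Char) : Option (List Char) :=
  if h : hfSep.isPrefixOf l = true then
    some ((tailOf (l.drop 15)).getD (l.drop 15))
  else
    match l with
    | [] => none
    | _ :: r => tailOf r
termination_by l.length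
decreasing_by
  · have hp := List.isPrefixOf_iff_prefix.mp h
    have : 15 ≤ l.length := by
      have := hp.length_le; rw [hfSep_len] at this; omega
    simp; omega
  · simp

theorem tailOf_none_noocc : ∀ l, tailOf l = none → ∀ j, ¬ hfSep <+: l.drop j := by
  intro l
  induction hn : l.length using Nat.strong_induction_on generalizing l with
  | _ n IH =>
    subst hn
    intro hno j
    rw [tailOf] at hno
    by_cases hp : hfSep.isPrefixOf l = true
    · simp [hp] at hno
    · simp only [hp] at hno
      cases l with
      | nil =>
          intro hc
          rw [List.drop_nil] at hc
          exact hfSep_ne_nil (List.prefix_nil.mp hc)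
      | cons c rest =>
        cases j with
        | zero => simpa [List.isPrefixOf_iff_prefix] using hp
        | succ j' =>
          simp only [List.drop_succ_cons]
          exact IH rest.length (by simp) rest rfl hno j'

theorem tailOf_some_spec : ∀ l t, tailOf l = some t →
    ∃ j, hfSep <+: l.drop j ∧ t = l.drop (j + 15) ∧ ∀ i, j < i → ¬ hfSep <+: l.drop i := by
  intro l
  induction hn : l.length using Nat.strong_induction_on generalizing l with
  | _ n IH =>
    subst hn
    intro t ht
    rw [tailOf] at ht
    by_cases hp : hfSep.isPrefixOf l = true
    · simp only [hp, dif_pos, Option.some.injEq] at ht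
      have hpre := List.isPrefixOf_iff_prefix.mp hp
      have hlen15 : 15 ≤ l.length := by have := hpre.length_le; rw [hfSep_len] at this; omega
      cases hrec : tailOf (l.drop 15) with
      | none =>
        refine ⟨0, by simpa using hpre, by simp [← ht, hrec], ?_⟩
        intro i hi
        by_cases hi15 : i < 15
        · exact noOverlap l i (by simpa using hpre) hi hi15
        · have := tailOf_none_noocc (l.drop 15) hrec (i - 15)
          rw [List.drop_drop] at this
          rwa [show 15 + (i - 15) = i from by omega] at this
      | some t' =>
        obtain ⟨j', hj1, hj2, hj3⟩ := IH (l.drop 15).length (by simp; omega) _ rfl t' hrec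
        rw [List.drop_drop] at hj1 hj2
        rw [Nat.add_comm 15 j'] at hj1
        refine ⟨j' + 15, hj1, ?_, ?_⟩
        · rw [← ht, hrec]; simp only [Option.getD_some]; rw [hj2]; congr 1; omega
        · intro i hi
          have := hj3 (i - 15) (by omega)
          rw [List.drop_drop] at this
          rwa [show 15 + (i - 15) = i from by omega] at this
    · simp only [hp] at ht
      cases l with
      | nil => simp at ht
      | cons c rest =>
        obtain ⟨j', hj1, hj2, hj3⟩ := IH rest.length (by simp) rest rfl t ht
        refine ⟨j' + 1, by simpa using hj1, by simpa [Nat.add_right_comm] using hj2, ?_⟩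
        intro i hi
        cases i with
        | zero => omega
        | succ i' => simpa using hj3 i' (by omega)

theorem rfind_go_none (s : List Char) (n : Nat)
    (h : ∀ j, j ≤ n → ¬ hfSep <+: s.drop j) : PySem.Chars.rfind.go s hfSep n = -1 := by
  induction n with
  | zero =>
    rw [PySem.Chars.rfind.go]
    have h0 := h 0 le_rfl
    rw [List.drop_zero] at h0
    rw [if_neg (by simpa [List.isPrefixOf_iff_prefix] using h0)]
  | succ m IHm =>
    rw [PySem.Chars.rfind.go]
    rw [if_neg (by simpa [List.isPrefixOf_iff_prefix] using h (m+1) le_rfl)]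
    exact IHm (fun j hj => h j (by omega))

theorem rfind_go_some (s : List Char) (j : Nat) : ∀ n, j ≤ n → hfSep <+: s.drop j →
    (∀ i, j < i → ¬ hfSep <+: s.drop i) → PySem.Chars.rfind.go s hfSep n = (j : Int) := by
  intro n
  induction n with
  | zero =>
    intro hjn hpre _
    rw [PySem.Chars.rfind.go]
    have : j = 0 := by omega
    subst this
    rw [List.drop_zero] at hpre
    rw [if_pos (by simpa [List.isPrefixOf_iff_prefix] using hpre)]
    simp
  | succ m IHm =>
    intro hjn hpre hmax
    rw [PySem.Chars.rfind.go]
    by_cases hj : j = m + 1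
    · subst hj
      rw [if_pos (by simpa [List.isPrefixOf_iff_prefix] using hpre)]
    · rw [if_neg (by simpa [List.isPrefixOf_iff_prefix] using hmax (m+1) (by omega))]
      exact IHm (by omega) hpre hmax

theorem noOcc_splitOn : ∀ l, (∀ j, ¬ hfSep <+: l.drop j) → PySem.Chars.splitOn l hfSep = [l] := by
  intro l
  induction l with
  | nil => intro _; exact splitOn_nil hfSep
  | cons c rest IHl =>
    intro h
    have hp : ¬ hfSep.isPrefixOf (c :: rest) = true := by
      simpa [List.isPrefixOf_iff_prefix] using h 0
    rw [splitOn_cons_not_prefix hfSep c rest hfSep_ne_nil hp]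
    rw [IHl (fun j => by simpa using h (j+1))]
    simp [mapHead]

theorem splitOn_len2 : ∀ l j, hfSep <+: l.drop j → 2 ≤ (PySem.Chars.splitOn l hfSep).length := by
  intro l
  induction hn : l.length using Nat.strong_induction_on generalizing l with
  | _ n IH =>
    subst hn
    intro j hj
    by_cases hp : hfSep.isPrefixOf l = true
    · rw [splitOn_prefix hfSep l hfSep_ne_nil hp]
      have := splitOn_ne_nil hfSep hfSep_ne_nil (l.drop hfSep.length)
      simp only [List.length_cons]
      have : 1 ≤ (PySem.Chars.splitOn (l.drop hfSep.length) hfSep).length := by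
        cases hq : PySem.Chars.splitOn (l.drop hfSep.length) hfSep with
        | nil => exact absurd hq this
        | cons a b => simp
      omega
    · cases l with
      | nil =>
        exfalso
        rw [List.drop_nil] at hj
        exact hfSep_ne_nil (List.prefix_nil.mp hj)
      | cons c rest =>
        have hj0 : j ≠ 0 := by
          intro h0; subst h0; rw [List.drop_zero] at hj
          exact hp (List.isPrefixOf_iff_prefix.mpr hj)
        obtain ⟨j', rfl⟩ := Nat.exists_eq_succ_of_ne_zero hj0
        rw [List.drop_succ_cons] at hj
        rw [splitOn_cons_not_prefix hfSep c rest hfSep_ne_nil hp]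
        have h2 := IH rest.length (by simp) rest rfl j' hj
        cases hq : PySem.Chars.splitOn rest hfSep with
        | nil => rw [hq] at h2; simp at h2
        | cons a b => rw [hq] at h2; simpa [mapHead] using h2

theorem lastA : ∀ l t, tailOf l = some t →
    (PySem.Chars.splitOn l hfSep).getLast? = some t := by
  intro l
  induction hn : l.length using Nat.strong_induction_on generalizing l with
  | _ n IH =>
    subst hn
    intro t ht
    rw [tailOf] at ht
    by_cases hp : hfSep.isPrefixOf l = true
    · simp only [hp, dif_pos, Option.some.injEq] at ht
      have hpre := List.isPrefixOf_iff_prefix.mp hp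
      have hlen15 : 15 ≤ l.length := by have := hpre.length_le; rw [hfSep_len] at this; omega
      rw [splitOn_prefix hfSep l hfSep_ne_nil hp]
      rw [hfSep_len]
      cases hrec : tailOf (l.drop 15) with
      | none =>
        rw [noOcc_splitOn _ (tailOf_none_noocc _ hrec)]
        rw [← ht, hrec]
        simp [List.getLast?_cons_cons]
      | some t' =>
        have hrw := IH (l.drop 15).length (by simp; omega) _ rfl t' hrec
        cases hq : PySem.Chars.splitOn (l.drop 15) hfSep with
        | nil => exact absurd hq (splitOn_ne_nil hfSep hfSep_ne_nil _)
        | cons a b =>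
          rw [hq] at hrw
          rw [List.getLast?_cons_cons]
          rw [hrw, ← ht, hrec]
          simp
    · simp only [hp] at ht
      cases l with
      | nil => simp at ht
      | cons c rest =>
        rw [splitOn_cons_not_prefix hfSep c rest hfSep_ne_nil hp]
        have hlast := IH rest.length (by simp) rest rfl t ht
        have hocc : ∃ j, hfSep <+: rest.drop j := by
          obtain ⟨j, hj, _, _⟩ := tailOf_some_spec rest t ht
          exact ⟨j, hj⟩
        obtain ⟨j, hj⟩ := hocc
        have h2 := splitOn_len2 rest j hj
        cases hq : PySem.Chars.splitOn rest hfSep with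
        | nil => rw [hq] at h2; simp at h2
        | cons a b =>
          cases b with
          | nil => rw [hq] at h2; simp at h2
          | cons a2 b2 =>
            rw [hq] at hlast
            simp only [mapHead]
            rw [List.getLast?_cons_cons] at hlast ⊢
            exact hlast

theorem splitOn_single (c : Char) : ∀ l, PySem.Chars.splitOn l [c] =
    match l.dropWhile (· ≠ c) with
    | [] => [l.takeWhile (· ≠ c)]
    | _ :: m => l.takeWhile (· ≠ c) :: PySem.Chars.splitOn m [c] := by
  intro l
  induction l with
  | nil => simp [splitOn_nil]
  | cons a rest IHl =>
    by_cases hac : a = c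
    · subst hac
      rw [splitOn_prefix [a] (a :: rest) (by simp) (by simp [List.isPrefixOf])]
      simp [List.dropWhile, List.takeWhile]
    · have hp : ¬ ([c].isPrefixOf (a :: rest)) = true := by
        simp [List.isPrefixOf]; exact fun h => absurd h.symm hac
      rw [splitOn_cons_not_prefix [c] a rest (by simp) hp]
      rw [IHl]
      have hdw : (a :: rest).dropWhile (· ≠ c) = rest.dropWhile (· ≠ c) := by
        simp [List.dropWhile, hac]
      have htw : (a :: rest).takeWhile (· ≠ c) = a :: rest.takeWhile (· ≠ c) := by
        simp [List.takeWhile, hac]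
      rw [hdw, htw]
      cases rest.dropWhile (· ≠ c) with
      | nil => simp [mapHead]
      | cons x m => simp [mapHead]

def segsOf (l : List Char) : List (List Char) :=
  match l with
  | [] => []
  | c :: r =>
    if c = '/' then segsOf r
    else (c :: r.takeWhile (· ≠ '/')) :: segsOf (r.dropWhile (· ≠ '/'))
termination_by l.length
decreasing_by
  · simp
  · have := List.length_dropWhile_le (fun x => !decide (x = '/')) r
    simp only [List.length_cons]
    simp at this ⊢
    omega

theorem dropWhile_slash_head : ∀ (r : List Char) x m, r.dropWhile (· ≠ '/') = x :: m → x = '/' := by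
  intro r
  induction r with
  | nil => intro x m h; simp [List.dropWhile] at h
  | cons a rest IHr =>
    intro x m h
    by_cases ha : a = '/'
    · subst ha
      simp [List.dropWhile] at h
      exact h.1.symm
    · rw [List.dropWhile_cons_of_pos (by simpa using ha)] at h
      exact IHr x m h

theorem filter_splitOn_slash : ∀ l, (PySem.Chars.splitOn l ['/']).filter (· ≠ []) = segsOf l := by
  intro l
  induction hn : l.length using Nat.strong_induction_on generalizing l with
  | _ n IH =>
    subst hn
    cases l with
    | nil => simp [splitOn_nil, segsOf]
    | cons c r =>
      by_cases hc : c = '/'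
      · subst hc
        rw [splitOn_prefix ['/'] ('/' :: r) (by simp) (by simp [List.isPrefixOf])]
        rw [segsOf]
        simp only [if_pos rfl]
        simp only [List.length_cons, List.drop_succ_cons, List.drop_zero]
        rw [List.filter_cons]
        simp only [show ((¬([] : List Char) = []) = False) from by simp, decide_false]
        rw [if_neg (by simp)]
        exact IH r.length (by simp) r rfl
      · rw [splitOn_single '/']
        rw [List.takeWhile_cons_of_pos (by simpa using hc),
            List.dropWhile_cons_of_pos (by simpa using hc)]
        rw [segsOf]
        rw [if_neg hc]
        cases hdw : r.dropWhile (· ≠ '/') with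
        | nil =>
          simp [segsOf]
        | cons x m =>
          have hx : x = '/' := dropWhile_slash_head r x m hdw
          subst hx
          rw [List.filter_cons]
          rw [if_pos (by simp)]
          have hmlen : m.length < r.length + 1 := by
            have := List.length_dropWhile_le (fun x => !decide (x = '/')) r
            rw [show (fun x => !decide (x = '/')) = (fun x : Char => decide (x ≠ '/')) from by funext y; simp] at this
            rw [hdw] at this
            simp at this
            omega
          rw [IH m.length (by simpa using hmlen) m rfl]
          rw [segsOf]
          simp

theorem tw_append {α : Type} (p : α → Bool) :
    ∀ (r xs : List α), List.takeWhile p (r ++ xs) =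
      (if (List.dropWhile p r).isEmpty then r ++ List.takeWhile p xs else List.takeWhile p r) := by
  intro r
  induction r with
  | nil => intro xs; simp
  | cons a rest IHr =>
    intro xs
    by_cases ha : p a = true
    · rw [List.cons_append, List.takeWhile_cons_of_pos ha, List.dropWhile_cons_of_pos ha,
          List.takeWhile_cons_of_pos ha, IHr xs]
      by_cases h : (List.dropWhile p rest).isEmpty <;> simp [h]
    · rw [List.cons_append, List.takeWhile_cons_of_neg (by simpa using ha),
          List.dropWhile_cons_of_neg (by simpa using ha),
          List.takeWhile_cons_of_neg (by simpa using ha)]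
      simp

theorem dw_append {α : Type} (p : α → Bool) :
    ∀ (r xs : List α), List.dropWhile p (r ++ xs) =
      (if (List.dropWhile p r).isEmpty then List.dropWhile p xs else List.dropWhile p r ++ xs) := by
  intro r
  induction r with
  | nil => intro xs; simp
  | cons a rest IHr =>
    intro xs
    by_cases ha : p a = true
    · rw [List.cons_append, List.dropWhile_cons_of_pos ha, List.dropWhile_cons_of_pos ha, IHr xs]
    · rw [List.cons_append, List.dropWhile_cons_of_neg (by simpa using ha),
          List.dropWhile_cons_of_neg (by simpa using ha)]
      simp

theorem segsOf_all_slash : ∀ l, (∀ c ∈ l, c = '/') → segsOf l = [] := by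
  intro l
  induction l with
  | nil => intro _; rw [segsOf]
  | cons c r IHl =>
    intro h
    rw [segsOf, if_pos (h c (by simp))]
    exact IHl (fun x hx => h x (by simp [hx]))

theorem segsOf_nil_imp : ∀ l, segsOf l = [] → ∀ c ∈ l, c = '/' := by
  intro l
  induction l with
  | nil => simp
  | cons c r IHl =>
    intro h
    rw [segsOf] at h
    by_cases hc : c = '/'
    · rw [if_pos hc] at h
      intro x hx
      rcases List.mem_cons.mp hx with h1 | h2
      · rw [h1, hc]
      · exact IHl h x h2
    · rw [if_neg hc] at h
      simp at h

theorem segsOf_lead_slash : ∀ ss l, (∀ c ∈ ss, c = '/') → segsOf (ss ++ l) = segsOf l := by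
  intro ss
  induction ss with
  | nil => simp
  | cons a rest IHs =>
    intro l h
    rw [List.cons_append, segsOf, if_pos (h a (by simp))]
    exact IHs l (fun x hx => h x (by simp [hx]))

theorem tw_of_dw_nil {α : Type} (p : α → Bool) (r : List α)
    (h : List.dropWhile p r = []) : List.takeWhile p r = r := by
  have h2 := List.takeWhile_append_dropWhile (p := p) (l := r)
  rw [h] at h2
  simpa using h2

theorem segsOf_append_slash : ∀ l ts, (∀ c ∈ ts, c = '/') → segsOf (l ++ ts) = segsOf l := by
  intro l
  induction hn : l.length using Nat.strong_induction_on generalizing l with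
  | _ n IH =>
    subst hn
    intro ts hts
    cases l with
    | nil => simpa [segsOf] using segsOf_all_slash ts hts
    | cons c r =>
      by_cases hc : c = '/'
      · subst hc
        rw [List.cons_append, segsOf, if_pos rfl, segsOf, if_pos rfl]
        exact IH r.length (by simp) r rfl ts hts
      · rw [List.cons_append, segsOf, if_neg hc, segsOf, if_neg hc]
        rw [tw_append _ r ts, dw_append _ r ts]
        by_cases hdw : (List.dropWhile (fun x => decide (x ≠ '/')) r).isEmpty
        · have hr : List.dropWhile (fun x => decide (x ≠ '/')) r = [] := by
            simpa [List.isEmpty_iff] using hdw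
          have htwr : List.takeWhile (fun x => decide (x ≠ '/')) r = r := tw_of_dw_nil _ r hr
          simp only [hdw, if_true]
          have hr2 := hr; have htwr2 := htwr
          simp only [decide_not] at hr2 htwr2
          cases ts with
          | nil => simp [segsOf, hr, htwr, hr2, htwr2]
          | cons t0 ts' =>
            have ht0 : t0 = '/' := hts t0 (by simp)
            rw [List.takeWhile_cons_of_neg (by simp [ht0]), List.dropWhile_cons_of_neg (by simp [ht0])]
            rw [segsOf_all_slash _ hts]
            rw [hr, htwr]
            simp [segsOf]
        · have hdw' : (List.dropWhile (fun x => decide (x ≠ '/')) r).isEmpty = false := by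
            simpa using hdw
          simp only [hdw', Bool.false_eq_true, if_false]
          have hmlen : (List.dropWhile (fun x => decide (x ≠ '/')) r).length ≤ r.length :=
            List.length_dropWhile_le _ r
          rw [IH (List.dropWhile (fun x => decide (x ≠ '/')) r).length
                (by simp only [List.length_cons]; omega) _ rfl ts hts]

theorem strip_decomp (l : List Char) :
    ∃ ss ts, (∀ c ∈ ss, c = '/') ∧ (∀ c ∈ ts, c = '/') ∧
      l = ss ++ PySem.Chars.stripChars l ['/'] ++ ts := by
  unfold PySem.Chars.stripChars
  set p := fun c => (['/'] : List Char).contains c with hp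
  have hpc : ∀ c, p c = true → c = '/' := by
    intro c h
    rw [hp] at h
    simpa using h
  set m := List.dropWhile p l with hm
  refine ⟨l.takeWhile p, (List.takeWhile p m.reverse).reverse, ?_, ?_, ?_⟩
  · intro c hc; exact hpc c (List.mem_takeWhile_imp hc)
  · intro c hc; rw [List.mem_reverse] at hc; exact hpc c (List.mem_takeWhile_imp hc)
  · conv_lhs => rw [← List.takeWhile_append_dropWhile (p := p) (l := l)]
    rw [← hm, List.append_assoc]
    congr 1
    conv_lhs => rw [← List.reverse_reverse m]
    conv_lhs => rw [← List.takeWhile_append_dropWhile (p := p) (l := m.reverse)]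
    rw [List.reverse_append]

theorem segsOf_strip (l : List Char) :
    segsOf (PySem.Chars.stripChars l ['/']) = segsOf l := by
  obtain ⟨ss, ts, hss, hts, heq⟩ := strip_decomp l
  conv_rhs => rw [heq, List.append_assoc]
  rw [segsOf_lead_slash ss _ hss, segsOf_append_slash _ ts hts]

theorem strip_nil_iff (l : List Char) :
    PySem.Chars.stripChars l ['/'] = [] ↔ segsOf l = [] := by
  constructor
  · intro h
    obtain ⟨ss, ts, hss, hts, heq⟩ := strip_decomp l
    rw [h] at heq
    rw [heq, List.append_assoc]
    rw [segsOf_lead_slash ss _ hss]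
    simpa using segsOf_all_slash ts hts
  · intro h
    have hall := segsOf_nil_imp l h
    have hdw : List.dropWhile (fun c => (['/'] : List Char).contains c) l = [] := by
      rw [List.dropWhile_eq_nil_iff]
      intro x hx
      simp [hall x hx]
    show (List.dropWhile (fun c => (['/'] : List Char).contains c)
        (List.dropWhile (fun c => (['/'] : List Char).contains c) l).reverse).reverse = []
    rw [hdw]
    simp

def cutQH (l : List Char) : List Char := l.takeWhile (fun ch => decide (¬(ch = '?' ∨ ch = '#')))

theorem cut_comp : ∀ l : List Char,
    List.takeWhile (· ≠ '#') (List.takeWhile (· ≠ '?') l) = cutQH l := by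
  intro l
  induction l with
  | nil => simp [cutQH]
  | cons c r IHl =>
    by_cases hq : c = '?'
    · subst hq
      rw [List.takeWhile_cons_of_neg (by simp)]
      simp [cutQH, List.takeWhile_cons_of_neg]
    · by_cases hh : c = '#'
      · subst hh
        rw [List.takeWhile_cons_of_pos (by simp)]
        rw [List.takeWhile_cons_of_neg (by simp)]
        simp [cutQH, List.takeWhile_cons_of_neg]
      · rw [List.takeWhile_cons_of_pos (by simpa using hq),
            List.takeWhile_cons_of_pos (by simpa using hh)]
        rw [cutQH, List.takeWhile_cons_of_pos (by simp [hq, hh])]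
        rw [IHl, cutQH]

theorem headQ (c : Char) (l : List Char) :
    (PySem.Chars.splitOn l [c]).getD 0 [] = l.takeWhile (· ≠ c) := by
  rw [splitOn_single c l]
  cases l.dropWhile (· ≠ c) with
  | nil => simp
  | cons x m => simp

theorem seg_only (cur : List Char) (hne : cur ≠ []) (hclean : ∀ x ∈ cur, x ≠ '/') :
    segsOf cur = [cur] := by
  obtain ⟨c, cs, rfl⟩ := List.exists_cons_of_ne_nil hne
  rw [segsOf, if_neg (hclean c (by simp))]
  have hdw : List.dropWhile (fun x => decide (x ≠ '/')) cs = [] := by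
    rw [List.dropWhile_eq_nil_iff]
    intro x hx
    simpa using hclean x (by simp [hx])
  rw [hdw, tw_of_dw_nil _ cs hdw]
  rw [segsOf]

theorem seg_cons (cur x : List Char) (hne : cur ≠ []) (hclean : ∀ y ∈ cur, y ≠ '/') :
    segsOf (cur ++ '/' :: x) = cur :: segsOf x := by
  obtain ⟨c, cs, rfl⟩ := List.exists_cons_of_ne_nil hne
  rw [List.cons_append, segsOf, if_neg (hclean c (by simp))]
  have hdwcs : List.dropWhile (fun x => decide (x ≠ '/')) cs = [] := by
    rw [List.dropWhile_eq_nil_iff]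
    intro y hy
    simpa using hclean y (by simp [hy])
  rw [tw_append _ cs ('/' :: x), dw_append _ cs ('/' :: x)]
  rw [hdwcs]
  simp only [List.isEmpty_nil, if_true]
  rw [List.takeWhile_cons_of_neg (by simp), List.dropWhile_cons_of_neg (by simp)]
  rw [segsOf]
  simp

theorem scan_spec : ∀ (l : List Char) (segs : List (List Char)) (cur : List Char)
    (s : List (List Char)) (cu : List Char), segs.length ≤ 2 → (∀ x ∈ cur, x ≠ '/') →
    scanB l segs cur = (s, cu) →
    (if cu ≠ [] ∧ s.length < 2 then s ++ [cu] else s)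
      = (segs ++ segsOf (cur ++ cutQH l)).take 2 := by
  intro l
  induction l with
  | nil =>
    intro segs cur s cu hlen hclean heq
    rw [scanB] at heq
    cases heq
    rw [cutQH]
    simp only [List.takeWhile, List.append_nil]
    by_cases hcur : cur = []
    · subst hcur
      simp only [segsOf, List.append_nil]
      rw [if_neg (by simp)]
      rw [List.take_of_length_le (by simpa using hlen)]
    · rw [seg_only cur hcur hclean]
      by_cases h2 : segs.length < 2
      · rw [if_pos ⟨hcur, h2⟩]
        rw [List.take_of_length_le (by simp; omega)]
      · rw [if_neg (by tauto)]
        have : segs.length = 2 := by omega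
        rw [List.take_append_of_le_length (by omega), List.take_of_length_le (by omega)]
  | cons c rest IHl =>
    intro segs cur s cu hlen hclean heq
    rw [scanB] at heq
    by_cases hbrk : c = '?' ∨ c = '#' ∨ segs.length = 2
    · rw [if_pos hbrk] at heq
      cases heq
      rcases hbrk with hc | hc | hc
      · subst hc
        rw [cutQH, List.takeWhile_cons_of_neg (by simp)]
        by_cases hcur : cur = []
        · subst hcur
          rw [if_neg (by simp)]
          simp only [segsOf, List.append_nil]
          rw [List.take_of_length_le (by simpa using hlen)]
        · rw [List.append_nil, seg_only cur hcur hclean]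
          by_cases h2 : segs.length < 2
          · rw [if_pos ⟨hcur, h2⟩, List.take_of_length_le (by simp; omega)]
          · rw [if_neg (by tauto)]
            rw [List.take_append_of_le_length (by omega), List.take_of_length_le (by omega)]
      · subst hc
        rw [cutQH, List.takeWhile_cons_of_neg (by simp)]
        by_cases hcur : cur = []
        · subst hcur
          rw [if_neg (by simp)]
          simp only [segsOf, List.append_nil]
          rw [List.take_of_length_le (by simpa using hlen)]
        · rw [List.append_nil, seg_only cur hcur hclean]
          by_cases h2 : segs.length < 2
          · rw [if_pos ⟨hcur, h2⟩, List.take_of_length_le (by simp; omega)]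
          · rw [if_neg (by tauto)]
            rw [List.take_append_of_le_length (by omega), List.take_of_length_le (by omega)]
      · rw [if_neg (by omega)]
        rw [List.take_append_of_le_length (by omega), List.take_of_length_le (by omega)]
    · rw [if_neg hbrk] at heq
      push_neg at hbrk
      obtain ⟨hq, hh, h2⟩ := hbrk
      have h2' : segs.length < 2 := by omega
      by_cases hsl : c = '/'
      · subst hsl
        rw [if_pos rfl] at heq
        rw [cutQH, List.takeWhile_cons_of_pos (by simp), ← cutQH]
        by_cases hcur : cur = []
        · rw [if_neg (by simpa using hcur)] at heq
          subst hcur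
          rw [IHl segs [] s cu hlen (by simp) heq]
          simp only [List.nil_append]
          rw [segsOf, if_pos rfl]
        · rw [if_pos (by simpa using hcur)] at heq
          rw [IHl (segs ++ [cur]) [] s cu (by simp; omega) (by simp) heq]
          rw [seg_cons cur (cutQH rest) hcur hclean]
          simp [List.append_assoc]
      · rw [if_neg hsl] at heq
        rw [cutQH, List.takeWhile_cons_of_pos (by simp [hq, hh]), ← cutQH]
        rw [IHl segs (cur ++ [c]) s cu hlen
              (by intro x hx; rcases List.mem_append.mp hx with h | h
                  · exact hclean x h
                  · have hxc : x = c := by simpa using h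
                    subst hxc; exact hsl) heq]
        simp [List.append_assoc]

theorem main_equiv (url : String) :
    extract_repo_id_from_url url = extract_repo_id_from_url_alt url := by
  have hsep : "huggingface.co/".toList = hfSep := rfl
  set u := url.toList with hu
  cases htail : tailOf u with
  | none =>
    have hnoocc := tailOf_none_noocc u htail
    have hnotin : PySem.Chars.isIn hfSep u = false := by
      rw [PySem.Chars.isIn_eq_false_iff]
      intro hinf
      obtain ⟨j, hj⟩ := (PySem.Chars.exists_prefix_drop_iff_isIn hfSep u).mpr
        ((PySem.Chars.isIn_iff_infix hfSep u).mpr hinf)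
      exact hnoocc j hj
    have hrfind : PySem.Chars.rfind u hfSep = -1 := by
      unfold PySem.Chars.rfind
      exact rfind_go_none u u.length (fun j _ => hnoocc j)
    unfold extract_repo_id_from_url extract_repo_id_from_url_alt
    rw [hsep, ← hu, hnotin, hrfind]
    simp
  | some t =>
    obtain ⟨j, hj1, hj2, hj3⟩ := tailOf_some_spec u t htail
    have hjlen : j ≤ u.length := by
      by_contra hgt
      rw [List.drop_eq_nil_of_le (by omega)] at hj1
      exact hfSep_ne_nil (List.prefix_nil.mp hj1)
    have hisin : PySem.Chars.isIn hfSep u = true := by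
      rw [← PySem.Chars.exists_prefix_drop_iff_isIn]
      exact ⟨j, hj1⟩
    have hrfind : PySem.Chars.rfind u hfSep = (j : Int) := by
      unfold PySem.Chars.rfind
      exact rfind_go_some u j u.length hjlen hj1 hj3
    have hpieces_ne : PySem.Chars.splitOn u hfSep ≠ [] := splitOn_ne_nil hfSep hfSep_ne_nil u
    have hlastq := lastA u t htail
    have htail1 : PySem.List.pyGetD (PySem.Chars.splitOn u hfSep) (-1) [] = t := by
      rw [PySem.List.pyGetD_neg_one _ _ hpieces_ne]
      have hg := List.getLast?_eq_some_getLast (l := PySem.Chars.splitOn u hfSep) hpieces_ne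
      rw [hg] at hlastq
      exact Option.some.inj hlastq
    have htail2 : (PySem.Chars.splitOn t ['?']).getD 0 [] = t.takeWhile (· ≠ '?') := headQ '?' t
    have htail3 : (PySem.Chars.splitOn (t.takeWhile (· ≠ '?')) ['#']).getD 0 []
        = cutQH t := by rw [headQ '#' _, cut_comp]
    have hslice : PySem.Chars.slice u (some ((j : Int) + 15)) none = t := by
      have hc : ((j : Int) + 15) = ((j + 15 : Nat) : Int) := by push_cast; ring
      rw [hc]
      show PySem.List.slice u (some ((j + 15 : Nat) : Int)) none = t
      rw [PySem.List.slice_from_natCast u (j + 15)]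
      exact hj2.symm
    unfold extract_repo_id_from_url extract_repo_id_from_url_alt
    rw [hsep, ← hu, hisin, hrfind]
    simp only [show ((true = false) = False) from by simp, if_false]
    rw [if_neg (show ¬((j : Int) < 0) from by omega)]
    rw [hslice]
    rw [htail1]
    rw [show PySem.List.pyGetD (PySem.Chars.splitOn t ['?']) 0 [] = (PySem.Chars.splitOn t ['?']).getD 0 [] from PySem.List.pyGetD_zero _ _]
    rw [htail2]
    rw [show PySem.List.pyGetD (PySem.Chars.splitOn (t.takeWhile (· ≠ '?')) ['#']) 0 [] = (PySem.Chars.splitOn (t.takeWhile (· ≠ '?')) ['#']).getD 0 [] from PySem.List.pyGetD_zero _ _]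
    rw [htail3]
    cases hscan : scanB t [] [] with
    | mk s cu =>
      have hB := scan_spec t [] [] s cu (by simp) (by simp) hscan
      simp only [List.nil_append] at hB
      have hparts : (PySem.Chars.splitOn (PySem.Chars.stripChars (cutQH t) ['/']) ['/']).filter (fun p => p ≠ []) = segsOf (cutQH t) := by
        rw [filter_splitOn_slash, segsOf_strip]
      by_cases hPnil : segsOf (cutQH t) = []
      · have hstrip : PySem.Chars.stripChars (cutQH t) ['/'] = [] :=
          (strip_nil_iff _).mpr hPnil
        rw [if_pos hstrip]
        have hfin : (if cu ≠ [] ∧ s.length < 2 then s ++ [cu] else s) = [] := by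
          rw [hB, hPnil]; simp
        simp
        simpa using hfin
      · have hstrip : PySem.Chars.stripChars (cutQH t) ['/'] ≠ [] := by
          intro hc
          exact hPnil ((strip_nil_iff _).mp hc)
        rw [if_neg hstrip]
        simp only [hB, hparts]
        match hPm : segsOf (cutQH t) with
        | [] => exact absurd hPm hPnil
        | [p0] =>
          rw [if_neg (by simp), if_pos (by simp)]
          rw [if_neg (by simp)]
          simp [PySem.Chars.join, PySem.List.pyGetD_zero]
          simp [List.intercalate]
        | p0 :: p1 :: ps =>
          rw [if_pos (by simp)]
          rw [if_neg (by simp)]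
          simp only [List.take_succ_cons, List.take_zero]
          rw [PySem.List.pyGetD_zero]
          rw [show ((1 : Int)) = ((1 : Nat) : Int) from by norm_num, PySem.List.pyGetD_natCast]
          simp [PySem.Chars.join, List.intercalate]

-- ===== VERDICT (by name: the statement is the Claim_ definition above) =====
theorem extract_repo_id_from_url_spec : Claim_equal_extract_repo_id_from_url := by
  intro url _
  unfold Spec_extract_repo_id_from_url
  exact main_equiv url
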